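-- pv_equiv track=rewrite | github.com/mathmischief/mathbot | mathbot/calculator/__main__.py | format_error_place
-- ===== SOURCE A (Python) =====
-- ERROR_TEMPLATE = '''\
-- On line {line_num} at position {position}
-- {prev}
-- {cur}
-- {carat}
-- {next}
-- '''
--
-- def format_error_place(string, position):
-- 	lines = [''] + string.split('\n') + ['']
-- 	line = 1
-- 	while line < len(lines) - 2 and position > len(lines[line]):
-- 		position -= len(lines[line]) + 1
-- 		line += 1
-- 	return ERROR_TEMPLATE.format(
-- 		line_num = line,
-- 		position = position,
-- 		prev = lines[line - 1],
-- 		cur = lines[line],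
-- 		next = lines[line + 1],
-- 		carat = ' ' * position + '^'
-- 	)
-- ===== SOURCE B (Python) =====
-- ERROR_TEMPLATE = '''\
-- On line {line_num} at position {position}
-- {prev}
-- {cur}
-- {carat}
-- {next}
-- '''
--
-- def format_error_place(string, position):
-- 	# Cumulative line-start offsets + hand-rolled binary search (bisect_right)
-- 	# instead of the accumulating while-loop.
-- 	lines = [''] + string.split('\n') + ['']
-- 	starts = [0]
-- 	for ln in lines[1:-1]:
-- 		starts.append(starts[-1] + len(ln) + 1)
-- 	cut = starts[1:len(lines) - 2]
-- 	lo, hi = 0, len(cut)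
-- 	while lo < hi:
-- 		mid = (lo + hi) // 2
-- 		if cut[mid] <= position:
-- 			lo = mid + 1
-- 		else:
-- 			hi = mid
-- 	line = 1 + lo
-- 	col = position - starts[line - 1]
-- 	return ERROR_TEMPLATE.format(
-- 		line_num = line,
-- 		position = col,
-- 		prev = lines[line - 1],
-- 		cur = lines[line],
-- 		next = lines[line + 1],
-- 		carat = ' ' * col + '^'
-- 	)
-- ===== Notes on version B (the rewrite author's own statement) =====
-- stated objective: alternative
-- what changed: Replaces the accumulating while-loop over line indices by a precomputed list of cumulative line-start offsets plus a hand-written binary search (bisect_right) that locates the line, with the column obtained by subtracting that line's start offset.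
import Mathlib
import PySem

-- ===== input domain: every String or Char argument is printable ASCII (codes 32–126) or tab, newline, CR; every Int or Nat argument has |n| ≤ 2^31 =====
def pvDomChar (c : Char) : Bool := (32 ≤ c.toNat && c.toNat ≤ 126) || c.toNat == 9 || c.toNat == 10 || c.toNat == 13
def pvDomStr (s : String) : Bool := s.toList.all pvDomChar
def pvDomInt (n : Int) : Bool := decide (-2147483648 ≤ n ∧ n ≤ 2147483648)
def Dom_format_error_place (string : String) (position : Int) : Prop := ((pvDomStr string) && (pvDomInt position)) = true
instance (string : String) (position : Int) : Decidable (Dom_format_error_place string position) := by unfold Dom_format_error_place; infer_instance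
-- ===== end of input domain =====

-- B replaces A's accumulating while-loop over line indices by a cumulative-offset
-- list plus a hand-written binary search (bisect_right); objective: alternative.

-- ===== PORT A =====

-- the shared rendering of ERROR_TEMPLATE.format(...); ' ' * position is empty for
-- negative position, matching Python's str*int
def fepRender (lines : List String) (line position : Int) : String :=
  "On line " ++ PySem.Int.toStr line ++ " at position " ++ PySem.Int.toStr position ++ "\n"
    ++ PySem.List.pyGetD lines (line - 1) "" ++ "\n"
    ++ PySem.List.pyGetD lines line "" ++ "\n"
    ++ String.ofList (List.replicate position.toNat ' ') ++ "^\n"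
    ++ PySem.List.pyGetD lines (line + 1) "" ++ "\n"

-- the while-loop; fuel = lines.length bounds the number of iterations
def fepLoopA (lines : List String) (fuel : Nat) (line position : Int) : Int × Int :=
  match fuel with
  | 0 => (line, position)
  | f + 1 =>
    if line < PySem.List.len lines - 2 ∧
        position > PySem.Str.len (PySem.List.pyGetD lines line "") then
      fepLoopA lines f (line + 1)
        (position - PySem.Str.len (PySem.List.pyGetD lines line "") - 1)
    else (line, position)

def format_error_place (string : String) (position : Int) : String :=
  let lines : List String := [""] ++ ((PySem.Str.split? string "\n").getD []) ++ [""]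
  let r := fepLoopA lines lines.length 1 position
  fepRender lines r.1 r.2

-- ===== PORT B =====

-- builds the tail of the cumulative-starts list (the Python append loop)
def fepStartsB (acc : Int) : List String → List Int
  | [] => []
  | ln :: rest => (acc + PySem.Str.len ln + 1) :: fepStartsB (acc + PySem.Str.len ln + 1) rest

-- hand-rolled bisect_right on cut; fuel = cut.length + 1 bounds the halving steps
def fepBsearchB (cut : List Int) (position : Int) (fuel lo hi : Nat) : Nat :=
  match fuel with
  | 0 => lo
  | f + 1 =>
    if lo < hi then
      let mid := (lo + hi) / 2
      if PySem.List.pyGetD cut (mid : Int) 0 ≤ position then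
        fepBsearchB cut position f (mid + 1) hi
      else
        fepBsearchB cut position f lo mid
    else lo

def format_error_place_alt (string : String) (position : Int) : String :=
  let lines : List String := [""] ++ ((PySem.Str.split? string "\n").getD []) ++ [""]
  let starts : List Int := 0 :: fepStartsB 0 (PySem.List.slice lines (some 1) (some (-1)))
  let cut : List Int := PySem.List.slice starts (some 1) (some ((PySem.List.len lines) - 2))
  let lo := fepBsearchB cut position (cut.length + 1) 0 cut.length
  let line : Int := 1 + (lo : Int)
  let col : Int := position - PySem.List.pyGetD starts (line - 1) 0
  fepRender lines line col

-- ===== PRECONDITION & SPEC =====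
def Spec_format_error_place (string : String) (position : Int) (out : String) : Prop := out = format_error_place_alt string position
instance (string : String) (position : Int) (out : String) : Decidable (Spec_format_error_place string position out) := by unfold Spec_format_error_place; infer_instance

-- ===== CLAIM (what is proved, stated in full; the proofs are below) =====
def Claim_equal_format_error_place : Prop := ∀ (string : String) (position : Int), Dom_format_error_place string position → Spec_format_error_place string position (format_error_place string position)

-- ===== LEMMAS AND PROOFS =====

-- reference recursion
def fepRef : List String → Int → Int × Int
  | [], p => (1, p)
  | [_], p => (1, p)
  | ln :: r :: rs, p =>
    if p > PySem.Str.len ln then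
      ((fepRef (r :: rs) (p - PySem.Str.len ln - 1)).1 + 1,
       (fepRef (r :: rs) (p - PySem.Str.len ln - 1)).2)
    else (1, p)

theorem go_ne_nil : ∀ (fuel : Nat) (sep l cur : List Char) (acc : List (List Char)),
    PySem.Chars.splitOn.go sep fuel l cur acc ≠ [] := by
  intro fuel
  induction fuel with
  | zero => intro sep l cur acc; simp [PySem.Chars.splitOn.go]
  | succ f ih =>
    intro sep l cur acc
    cases l with
    | nil => simp [PySem.Chars.splitOn.go]
    | cons c rest =>
      rw [PySem.Chars.splitOn.go]
      split
      · exact ih _ _ _ _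
      · exact ih _ _ _ _

theorem mid_ne_nil (s : String) : (PySem.Str.split? s "\n").getD [] ≠ [] := by
  simp [PySem.Str.split?, PySem.Chars.split?, PySem.Chars.splitOn]
  exact go_ne_nil _ _ _ _ _

theorem pyGetD_inner (pre rest : List String) (ln : String) :
    PySem.List.pyGetD ("" :: (pre ++ ln :: rest) ++ [""]) ((pre.length : Int) + 1) "" = ln := by
  have h1 : ("" :: (pre ++ ln :: rest) ++ [""]) = ("" :: pre) ++ ln :: (rest ++ [""]) := by simp
  have h2 : ((pre.length : Int) + 1) = ((("" :: pre).length : Nat) : Int) := by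
    simp
  rw [h1, h2, PySem.List.pyGetD, PySem.List.pyGet?_append_length]
  rfl

theorem loopA_eq_ref : ∀ (mid : List String) (fuel : Nat) (pre : List String) (p : Int),
    mid ≠ [] → mid.length ≤ fuel →
    fepLoopA ("" :: (pre ++ mid) ++ [""]) fuel ((pre.length : Int) + 1) p
      = ((pre.length : Int) + (fepRef mid p).1, (fepRef mid p).2) := by
  intro mid
  induction mid with
  | nil => intro _ _ _ h _; exact absurd rfl h
  | cons ln rest ih =>
    intro fuel pre p _ hfuel
    obtain ⟨f, rfl⟩ : ∃ f, fuel = f + 1 := ⟨fuel - 1, by simp at hfuel; omega⟩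
    cases rest with
    | nil =>
      rw [fepLoopA, if_neg (by rintro ⟨h1, -⟩; simp [PySem.List.len_eq] at h1; omega)]
      simp [fepRef]
    | cons r rs =>
      rw [fepLoopA]
      have hlen : PySem.List.len ("" :: (pre ++ ln :: r :: rs) ++ [""]) - 2
          = (pre.length : Int) + (rs.length : Int) + 2 := by
        simp [PySem.List.len_eq]; omega
      by_cases hp : p > PySem.Str.len ln
      · rw [if_pos]
        · have hre : ("" :: (pre ++ ln :: r :: rs) ++ [""])
              = ("" :: ((pre ++ [ln]) ++ r :: rs) ++ [""]) := by simp
          have hidx : (pre.length : Int) + 1 + 1 = (((pre ++ [ln]).length : Nat) : Int) + 1 := by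
            simp
          rw [pyGetD_inner, hre, hidx, ih f (pre ++ [ln]) (p - PySem.Str.len ln - 1)
                (by simp) (by simp only [List.length_cons] at hfuel ⊢; omega)]
          rw [fepRef, if_pos hp]
          simp
          omega
        · rw [pyGetD_inner, hlen]
          refine ⟨?_, hp⟩
          omega
      · rw [if_neg, fepRef, if_neg hp]
        rw [pyGetD_inner, hlen]
        rintro ⟨-, h2⟩; exact hp h2

theorem length_fepStartsB (l : List String) : ∀ (a : Int), (fepStartsB a l).length = l.length := by
  induction l with
  | nil => intro a; rfl
  | cons ln rest ih => intro a; simp [fepStartsB, ih]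

theorem fepStartsB_shift (l : List String) : ∀ (a b : Int),
    fepStartsB (a + b) l = (fepStartsB b l).map (a + ·) := by
  induction l with
  | nil => intro a b; rfl
  | cons ln rest ih =>
    intro a b
    simp only [fepStartsB, List.map_cons]
    rw [show a + b + PySem.Str.len ln + 1 = a + (b + PySem.Str.len ln + 1) by ring,
      ih a (b + PySem.Str.len ln + 1)]

theorem fepStartsB_mem (l : List String) : ∀ (a x : Int), x ∈ fepStartsB a l → a < x := by
  induction l with
  | nil => intro a x h; simp [fepStartsB] at h
  | cons ln rest ih =>
    intro a x h
    have hlen : 0 ≤ PySem.Str.len ln := by simp [PySem.Str.len_eq]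
    simp only [fepStartsB, List.mem_cons] at h
    rcases h with h | h
    · omega
    · have := ih (a + PySem.Str.len ln + 1) x h; omega

theorem fepStartsB_pairwise (l : List String) : ∀ (a : Int),
    (fepStartsB a l).Pairwise (· ≤ ·) := by
  induction l with
  | nil => intro a; simp [fepStartsB]
  | cons ln rest ih =>
    intro a
    simp only [fepStartsB]
    exact List.Pairwise.cons
      (fun y hy => le_of_lt (fepStartsB_mem rest _ y hy)) (ih _)

theorem countP_eq_boundary (cut : List Int) (p : Int) (k : Nat) (hk : k ≤ cut.length)
    (h1 : ∀ (i : Nat) (h : i < cut.length), i < k → cut[i] ≤ p)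
    (h2 : ∀ (i : Nat) (h : i < cut.length), k ≤ i → p < cut[i]) :
    cut.countP (fun x => decide (x ≤ p)) = k := by
  have hsplit : cut = cut.take k ++ cut.drop k := (List.take_append_drop k cut).symm
  rw [hsplit, List.countP_append]
  have ht : (cut.take k).countP (fun x => decide (x ≤ p)) = k := by
    have hlen : (cut.take k).length = k := by simp [hk]
    have hall : ∀ x ∈ cut.take k, (fun x => decide (x ≤ p)) x = true := by
      intro x hx
      obtain ⟨i, hi, rfl⟩ := List.mem_iff_getElem.1 hx
      rw [List.getElem_take]
      simpa using h1 i (by simp at hi; omega) (by simp at hi; omega)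
    rw [List.countP_eq_length.2 hall, hlen]
  have hd : (cut.drop k).countP (fun x => decide (x ≤ p)) = 0 := by
    rw [List.countP_eq_zero]
    intro x hx
    obtain ⟨i, hi, rfl⟩ := List.mem_iff_getElem.1 hx
    rw [List.getElem_drop]
    simpa using h2 (k + i) (by simp at hi; omega) (by omega)
  omega

theorem bsearch_count (cut : List Int) (p : Int)
    (hmono : ∀ (i j : Nat) (hi : i < cut.length) (hj : j < cut.length), i ≤ j → cut[i] ≤ cut[j]) :
    ∀ (fuel lo hi : Nat), lo ≤ hi → hi ≤ cut.length → hi - lo ≤ fuel →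
    (∀ (i : Nat) (h : i < cut.length), i < lo → cut[i] ≤ p) →
    (∀ (i : Nat) (h : i < cut.length), hi ≤ i → p < cut[i]) →
    fepBsearchB cut p fuel lo hi = cut.countP (fun x => decide (x ≤ p)) := by
  intro fuel
  induction fuel with
  | zero =>
    intro lo hi hlh hhl hf h1 h2
    have : lo = hi := by omega
    subst this
    rw [fepBsearchB, countP_eq_boundary cut p lo (by omega) h1 h2]
  | succ f ih =>
    intro lo hi hlh hhl hf h1 h2
    rw [fepBsearchB]
    by_cases hlt : lo < hi
    · rw [if_pos hlt]
      have hmidlt : (lo + hi) / 2 < cut.length := by omega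
      have hget : PySem.List.pyGetD cut (((lo + hi) / 2 : Nat) : Int) 0
          = cut[(lo + hi) / 2] := by
        rw [PySem.List.pyGetD_natCast, List.getD_eq_getElem?_getD, List.getElem?_eq_getElem hmidlt]
        rfl
      by_cases hc : cut[(lo + hi) / 2] ≤ p
      · rw [if_pos (by rw [hget]; exact hc)]
        exact ih ((lo + hi) / 2 + 1) hi (by omega) hhl (by omega)
          (fun i hi' hilt => le_trans (hmono i ((lo + hi) / 2) hi' hmidlt (by omega)) hc) h2
      · rw [if_neg (by rw [hget]; exact hc)]
        exact ih lo ((lo + hi) / 2) (by omega) (by omega) (by omega) h1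
          (fun i hi' hile => lt_of_lt_of_le (by omega : p < cut[(lo + hi) / 2])
            (hmono ((lo + hi) / 2) i hmidlt hi' hile))
    · rw [if_neg hlt]
      have : lo = hi := by omega
      subst this
      exact (countP_eq_boundary cut p lo (by omega) h1 h2).symm

theorem ref_eq_count : ∀ (mid : List String) (p : Int), mid ≠ [] →
    fepRef mid p
      = (1 + ((fepStartsB 0 mid).dropLast.countP (fun x => decide (x ≤ p)) : Int),
         p - (0 :: fepStartsB 0 mid).getD
               ((fepStartsB 0 mid).dropLast.countP (fun x => decide (x ≤ p))) 0) := by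
  intro mid
  induction mid with
  | nil => intro _ h; exact absurd rfl h
  | cons ln rest ih =>
    intro p _
    cases rest with
    | nil => simp [fepRef, fepStartsB]
    | cons r rs =>
      have hT : fepStartsB (0 + PySem.Str.len ln + 1) (r :: rs)
          = (fepStartsB 0 (r :: rs)).map ((PySem.Str.len ln + 1) + ·) := by
        rw [show (0 : Int) + PySem.Str.len ln + 1 = (PySem.Str.len ln + 1) + 0 by ring,
          fepStartsB_shift]
      have hTne : (fepStartsB 0 (r :: rs)) ≠ [] := by
        intro h
        have := length_fepStartsB (r :: rs) 0
        rw [h] at this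
        simp at this
      have hone : fepStartsB 0 (ln :: r :: rs)
          = (0 + PySem.Str.len ln + 1) :: fepStartsB (0 + PySem.Str.len ln + 1) (r :: rs) := rfl
      have hS : fepStartsB 0 (ln :: r :: rs)
          = ((0 :: fepStartsB 0 (r :: rs)).map ((PySem.Str.len ln + 1) + ·)) := by
        rw [hone, hT, List.map_cons]
        congr 1
        ring
      have hdrop : (fepStartsB 0 (ln :: r :: rs)).dropLast
          = (0 + PySem.Str.len ln + 1)
              :: ((fepStartsB 0 (r :: rs)).dropLast.map ((PySem.Str.len ln + 1) + ·)) := by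
        rw [hone, hT, List.dropLast_cons_of_ne_nil (by simpa using hTne), List.map_dropLast]
      by_cases hp : p > PySem.Str.len ln
      · rw [fepRef, if_pos hp, ih (p - PySem.Str.len ln - 1) (by simp)]
        have hcount : (fepStartsB 0 (ln :: r :: rs)).dropLast.countP (fun x => decide (x ≤ p))
            = 1 + (fepStartsB 0 (r :: rs)).dropLast.countP
                (fun x => decide (x ≤ p - PySem.Str.len ln - 1)) := by
          rw [hdrop, List.countP_cons, List.countP_map]
          rw [List.countP_congr (q := fun x => decide (x ≤ p - PySem.Str.len ln - 1))
            (by intro x _; simp [PySem.Str.len_eq]; omega)]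
          have hp' : (ln.length : Int) < p := by simpa [PySem.Str.len_eq] using hp
          have hd : decide ((0 + PySem.Str.len ln + 1 : Int) ≤ p) = true := by
            simp
            omega
          rw [hd]
          simp
          omega
        rw [hcount]
        set c' := (fepStartsB 0 (r :: rs)).dropLast.countP
            (fun x => decide (x ≤ p - PySem.Str.len ln - 1)) with hc'
        have hc'lt : c' < (0 :: fepStartsB 0 (r :: rs)).length := by
          have h1 := List.countP_le_length (l := (fepStartsB 0 (r :: rs)).dropLast)
            (p := fun x => decide (x ≤ p - PySem.Str.len ln - 1))
          have h2 : (fepStartsB 0 (r :: rs)).dropLast.length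
              = (fepStartsB 0 (r :: rs)).length - 1 := by simp
          simp only [List.length_cons]
          omega
        have hgetD : (0 :: fepStartsB 0 (ln :: r :: rs)).getD (1 + c') 0
            = (PySem.Str.len ln + 1) + (0 :: fepStartsB 0 (r :: rs)).getD c' 0 := by
          rw [hS]
          have h1 : (0 :: (0 :: fepStartsB 0 (r :: rs)).map ((PySem.Str.len ln + 1) + ·)).getD
              (1 + c') 0 = ((0 :: fepStartsB 0 (r :: rs)).map ((PySem.Str.len ln + 1) + ·)).getD c' 0 := by
            rw [show 1 + c' = c' + 1 by omega]
            rfl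
          rw [h1, List.getD_eq_getElem?_getD, List.getElem?_map,
            List.getElem?_eq_getElem hc'lt, List.getD_eq_getElem?_getD,
            List.getElem?_eq_getElem hc'lt]
          rfl
        rw [hgetD]
        simp only [Prod.mk.injEq]
        refine ⟨by push_cast; ring, by ring⟩
      · rw [fepRef, if_neg hp]
        have hc0 : (fepStartsB 0 (ln :: r :: rs)).dropLast.countP (fun x => decide (x ≤ p)) = 0 := by
          rw [List.countP_eq_zero]
          intro x hx
          rw [hdrop] at hx
          simp only [List.mem_cons] at hx
          have hp' : ¬ (ln.length : Int) < p := by simpa [PySem.Str.len_eq] using hp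
          rcases hx with rfl | hx
          · simp [PySem.Str.len_eq]; omega
          · obtain ⟨t, ht, rfl⟩ := List.mem_map.1 hx
            have := fepStartsB_mem (r :: rs) 0 t ((List.dropLast_sublist _).subset ht)
            simp [PySem.Str.len_eq]
            omega
        rw [hc0]
        simp

theorem slice_pad (mid : List String) :
    PySem.List.slice ([""] ++ mid ++ [""]) (some 1) (some (-1)) = mid := by
  simp [PySem.List.slice, PySem.List.clampIdx]
  rw [if_neg (by omega)]
  simp

theorem slice_cut (mid : List String) (hne : mid ≠ []) :
    PySem.List.slice (0 :: fepStartsB 0 mid) (some 1)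
        (some (PySem.List.len ([""] ++ mid ++ [""]) - 2))
      = (fepStartsB 0 mid).dropLast := by
  have hlen : (fepStartsB 0 mid).length = mid.length := length_fepStartsB mid 0
  have h1 : 1 ≤ mid.length := by cases mid with | nil => exact absurd rfl hne | cons a l => simp
  have hlines : PySem.List.len ([""] ++ mid ++ [""]) - 2 = (mid.length : Int) := by
    simp [PySem.List.len_eq]
    omega
  rw [hlines]
  simp [PySem.List.slice, PySem.List.clampIdx, hlen, List.dropLast_eq_take]
  rw [if_neg (by omega)]
  omega

theorem cut_mono (mid : List String) :
    ∀ (i j : Nat) (hi : i < (fepStartsB 0 mid).dropLast.length)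
      (hj : j < (fepStartsB 0 mid).dropLast.length), i ≤ j →
      (fepStartsB 0 mid).dropLast[i] ≤ (fepStartsB 0 mid).dropLast[j] := by
  have hp : ((fepStartsB 0 mid).dropLast).Pairwise (· ≤ ·) :=
    (fepStartsB_pairwise mid 0).sublist (List.dropLast_sublist _)
  intro i j hi hj hij
  rcases Nat.lt_or_ge i j with h | h
  · exact List.pairwise_iff_getElem.1 hp i j hi hj h
  · have : i = j := by omega
    subst this; exact le_refl _

theorem ports_eq (string : String) (p : Int) :
    format_error_place string p = format_error_place_alt string p := by
  have hne : (PySem.Str.split? string "\n").getD [] ≠ [] := mid_ne_nil string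
  simp only [format_error_place, format_error_place_alt]
  set mid := (PySem.Str.split? string "\n").getD [] with hmiddef
  rw [slice_pad, slice_cut mid hne]
  have hA : fepLoopA ([""] ++ mid ++ [""]) ([""] ++ mid ++ [""]).length 1 p = fepRef mid p := by
    have h := loopA_eq_ref mid (([""] ++ mid ++ [""]).length) [] p hne (by simp; omega)
    simpa using h
  rw [hA, ref_eq_count mid p hne]
  set S := fepStartsB 0 mid with hS
  set c := (S.dropLast.countP (fun x => decide (x ≤ p))) with hc
  have hbs : fepBsearchB S.dropLast p (S.dropLast.length + 1) 0 S.dropLast.length = c := by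
    rw [hc]
    exact bsearch_count S.dropLast p (cut_mono mid) (S.dropLast.length + 1) 0 S.dropLast.length
      (by omega) (le_refl _) (by omega)
      (fun i h hlt => absurd hlt (by omega))
      (fun i h hle => absurd h (by omega))
  rw [hbs]
  have hidx : (1 + (c : Int)) - 1 = ((c : Nat) : Int) := by ring
  rw [hidx, PySem.List.pyGetD_natCast]

-- ===== VERDICT (by name: the statement is the Claim_ definition above) =====
theorem format_error_place_spec : Claim_equal_format_error_place := by
  intro string position _
  exact ports_eq string position
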